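-- pv_equiv track=rewrite | github.com/jatinarora2702/KnowledgeGraph | Review Processing/dataprocessing/mate_labeller.py | modify_term
-- ===== SOURCE A (Python) =====
-- def modify_term(sent, index, type_num):
-- 	newsent = list()
-- 	i = 0
-- 	for line in sent:
-- 		if i == index:
-- 			templist = list()
-- 			j = 0
-- 			for term in sent[i]:
-- 				if j == 12:
-- 					templist.append('Y')
-- 				elif j == 13:
-- 					templist.append('comparative.0' + str(type_num))
-- 				else:
-- 					templist.append(term)
-- 				j += 1
-- 			newsent.append(templist)
-- 		else:
-- 			newsent.append(sent[i])
-- 		i += 1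
-- 	return newsent
-- ===== SOURCE B (Python) =====
-- def modify_term(sent, index, type_num):
--     newsent = list(sent)
--     if 0 <= index < len(sent):
--         line = list(sent[index])
--         if len(line) > 12:
--             line[12] = 'Y'
--         if len(line) > 13:
--             line[13] = 'comparative.0' + str(type_num)
--         newsent[index] = line
--     return newsent
-- ===== Notes on version B (the rewrite author's own statement) =====
-- stated objective: simpler
-- what changed: Replaces the outer index-matching loop plus inner element-by-element rebuild with a shallow copy of the list and one targeted in-place patch of the single indexed line (guarded assignments at positions 12 and 13).
import Mathlib
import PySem

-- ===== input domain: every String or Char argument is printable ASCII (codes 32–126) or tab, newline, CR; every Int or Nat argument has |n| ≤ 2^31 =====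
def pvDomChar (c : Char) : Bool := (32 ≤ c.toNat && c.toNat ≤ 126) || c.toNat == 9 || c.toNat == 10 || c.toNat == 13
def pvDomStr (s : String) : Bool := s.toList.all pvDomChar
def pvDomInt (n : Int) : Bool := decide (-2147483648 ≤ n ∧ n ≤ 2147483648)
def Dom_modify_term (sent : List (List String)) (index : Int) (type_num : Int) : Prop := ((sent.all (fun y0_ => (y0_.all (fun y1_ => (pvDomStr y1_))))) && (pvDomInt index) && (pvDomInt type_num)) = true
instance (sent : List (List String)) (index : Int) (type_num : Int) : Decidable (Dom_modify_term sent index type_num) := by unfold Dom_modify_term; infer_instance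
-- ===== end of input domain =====

-- B replaces A's outer index-matching loop plus inner element-by-element rebuild with a
-- shallow copy and one targeted patch of the indexed line (objective: simpler).

-- ===== PORT A =====
-- inner loop of A: rebuild the matched line term by term, with counter j
def pvAInner (type_num : Int) (terms : List String) (j : Nat) : List String :=
  match terms with
  | [] => []
  | t :: rest =>
      (if j = 12 then "Y"
       else if j = 13 then "comparative.0" ++ PySem.Int.toStr type_num
       else t) :: pvAInner type_num rest (j + 1)

-- outer loop of A: walk sent with counter i, rebuilding the line where i == index
def pvAOuter (type_num index : Int) (sent : List (List String)) (i : Nat) : List (List String) :=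
  match sent with
  | [] => []
  | line :: rest =>
      (if (i : Int) = index then pvAInner type_num line 0 else line)
        :: pvAOuter type_num index rest (i + 1)

def modify_term (sent : List (List String)) (index : Int) (type_num : Int) : List (List String) :=
  pvAOuter type_num index sent 0

-- ===== PORT B =====
-- Source B's patch of the indexed line: guarded assignments at positions 12 and 13
def pvBPatch (type_num : Int) (line : List String) : List String :=
  let l1 := if 12 < line.length then line.set 12 "Y" else line
  if 13 < l1.length then l1.set 13 ("comparative.0" ++ PySem.Int.toStr type_num) else l1

def modify_term_alt (sent : List (List String)) (index : Int) (type_num : Int) : List (List String) :=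
  if 0 ≤ index ∧ index < sent.length then
    sent.set index.toNat (pvBPatch type_num (sent.getD index.toNat []))
  else sent

-- ===== PRECONDITION & SPEC =====
def Spec_modify_term (sent : List (List String)) (index : Int) (type_num : Int) (out : List (List String)) : Prop := out = modify_term_alt sent index type_num
instance (sent : List (List String)) (index : Int) (type_num : Int) (out : List (List String)) : Decidable (Spec_modify_term sent index type_num out) := by unfold Spec_modify_term; infer_instance

-- ===== CLAIM (what is proved, stated in full; the proofs are below) =====
def Claim_equal_modify_term : Prop := ∀ (sent : List (List String)) (index : Int) (type_num : Int), Dom_modify_term sent index type_num → Spec_modify_term sent index type_num (modify_term sent index type_num)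

-- ===== LEMMAS AND PROOFS =====

-- A's inner rebuild, started at counter j, equals targeted sets (List.set is a no-op out of range).
theorem pvAInner_eq (type_num : Int) (terms : List String) (j : Nat) :
    pvAInner type_num terms j =
      if j ≤ 12 then
        (terms.set (12 - j) "Y").set (13 - j) ("comparative.0" ++ PySem.Int.toStr type_num)
      else if j = 13 then terms.set 0 ("comparative.0" ++ PySem.Int.toStr type_num)
      else terms := by
  induction terms generalizing j with
  | nil => simp only [pvAInner, List.set_nil]; split_ifs <;> rfl
  | cons t rest ih =>
    simp only [pvAInner]
    rcases Nat.lt_or_ge j 12 with h | h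
    · have h12 : 12 - j = (11 - j) + 1 := by omega
      have h13 : 13 - j = (12 - j) + 1 := by omega
      have h12' : 12 - (j + 1) = 11 - j := by omega
      have h13' : 13 - (j + 1) = 12 - j := by omega
      rw [ih (j + 1)]
      simp only [show j ≤ 12 from by omega, show j + 1 ≤ 12 from by omega, if_true,
        show ¬(j = 12) from by omega, show ¬(j = 13) from by omega, if_false,
        h12, h13, List.set_cons_succ, h12', h13']
    · rcases Nat.eq_or_lt_of_le h with h12 | h'
      · -- j = 12
        rw [ih (j + 1)]
        simp [← h12]
      · rcases Nat.eq_or_lt_of_le h' with h13 | h'' 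
        · -- j = 13
          rw [ih (j + 1)]
          simp [← h13]
        · -- j ≥ 14
          rw [ih (j + 1)]
          simp only [show ¬(j ≤ 12) from by omega, show ¬(j + 1 ≤ 12) from by omega,
            show ¬(j = 12) from by omega, show ¬(j = 13) from by omega,
            show ¬(j + 1 = 13) from by omega, if_false]

-- B's guarded patch equals the same unguarded pair of sets.
theorem pvBPatch_eq (type_num : Int) (line : List String) :
    pvBPatch type_num line =
      (line.set 12 "Y").set 13 ("comparative.0" ++ PySem.Int.toStr type_num) := by
  unfold pvBPatch
  by_cases h1 : 12 < line.length
  · rw [if_pos h1]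
    by_cases h2 : 13 < (line.set 12 "Y").length
    · rw [if_pos h2]
    · rw [if_neg h2]
      exact (List.set_eq_of_length_le (by simp only [List.length_set] at h2 ⊢; omega)).symm
  · rw [if_neg h1, if_neg (by omega),
      List.set_eq_of_length_le (l := line) (i := 12) (a := "Y") (by omega)]
    exact (List.set_eq_of_length_le (by omega)).symm

-- A's outer loop at counter i equals a single targeted replacement at index - i.
theorem pvAOuter_eq (type_num index : Int) (sent : List (List String)) (i : Nat) :
    pvAOuter type_num index sent i =
      if 0 ≤ index - i ∧ index - i < sent.length then
        sent.set (index - i).toNat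
          (pvAInner type_num (sent.getD (index - i).toNat []) 0)
      else sent := by
  induction sent generalizing i with
  | nil =>
    simp only [pvAOuter, List.length_nil]
    rw [if_neg (by push_cast; omega)]
  | cons line rest ih =>
    simp only [pvAOuter, ih (i + 1)]
    by_cases hi : (i : Int) = index
    · rw [if_pos hi, if_neg (by push_cast; omega),
        if_pos (by simp only [List.length_cons]; push_cast; omega)]
      simp [show (index - (i : Int)).toNat = 0 from by omega]
    · rw [if_neg hi]
      by_cases hr : 0 ≤ index - ((i + 1 : Nat) : Int) ∧ index - ((i + 1 : Nat) : Int) < (rest.length : Int)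
      · rw [if_pos hr,
          if_pos (show 0 ≤ index - i ∧ index - i < ((line :: rest).length : Int) by
            simp only [List.length_cons]; push_cast at hr ⊢; omega),
          show (index - (i : Int)).toNat = (index - ((i + 1 : Nat) : Int)).toNat + 1 from by
            push_cast at hr ⊢; omega]
        simp
      · rw [if_neg hr,
          if_neg (by simp only [List.length_cons]; push_cast at hr ⊢; omega)]

-- ===== VERDICT (by name: the statement is the Claim_ definition above) =====
theorem modify_term_spec : Claim_equal_modify_term := by
  intro sent index type_num _
  show modify_term sent index type_num = modify_term_alt sent index type_num
  unfold modify_term modify_term_alt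
  rw [pvAOuter_eq]
  simp only [Nat.cast_zero, sub_zero]
  by_cases h : 0 ≤ index ∧ index < (sent.length : Int)
  · rw [if_pos h, if_pos h, pvAInner_eq, pvBPatch_eq]
    norm_num
  · rw [if_neg h, if_neg h]
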